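-- pv_equiv track=rewrite | github.com/mmvergara/mmv-dsa | hk_alice_bob.py | solve
-- ===== SOURCE A (Python) =====
-- def solve(a, b):
--     ap,bp = 0,0
--     for i in range(len(a)):
--         if a[i] > b[i]:
--             ap+=1
--         else:
--             bp+=1
--     return [ap,bp]
-- ===== SOURCE B (Python) =====
-- def solve(a, b):
--     # Divide and conquer: split the index range in half, count wins in each
--     # half recursively, add the two result vectors (recursion depth O(log n)).
--     def go(lo, hi):
--         if hi - lo <= 0:
--             return [0, 0]
--         if hi - lo == 1:
--             return [1, 0] if a[lo] > b[lo] else [0, 1]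
--         mid = (lo + hi) // 2
--         l = go(lo, mid)
--         r = go(mid, hi)
--         return [l[0] + r[0], l[1] + r[1]]
--     return go(0, len(a))
-- ===== Notes on version B (the rewrite author's own statement) =====
-- stated objective: alternative
-- what changed: Replaces the single left-to-right loop with two counters by a divide-and-conquer recursion that splits the index range at the midpoint, counts wins in each half and adds the two result vectors.
import Mathlib
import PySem

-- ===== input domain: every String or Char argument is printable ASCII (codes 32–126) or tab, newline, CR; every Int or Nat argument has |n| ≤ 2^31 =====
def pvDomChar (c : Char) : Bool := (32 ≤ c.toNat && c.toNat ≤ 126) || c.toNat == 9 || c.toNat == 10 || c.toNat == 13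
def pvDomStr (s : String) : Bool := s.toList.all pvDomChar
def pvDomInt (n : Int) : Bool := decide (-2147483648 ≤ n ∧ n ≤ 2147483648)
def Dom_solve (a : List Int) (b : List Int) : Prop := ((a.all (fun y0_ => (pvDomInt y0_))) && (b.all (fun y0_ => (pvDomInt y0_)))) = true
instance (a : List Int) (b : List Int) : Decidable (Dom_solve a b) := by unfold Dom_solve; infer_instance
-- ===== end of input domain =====

-- B counts wins by divide and conquer over the index range instead of A's
-- left-to-right two-counter loop; objective: alternative algorithm.
-- Indexing is ported with pyGet?.getD 0, exact under Pre_solve (no IndexError there).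

-- ===== PORT A =====
def solve (a : List Int) (b : List Int) : List Int :=
  let p := (PySem.List.pyRange 0 a.length 1).foldl
    (fun (s : Int × Int) i =>
      if (PySem.List.pyGet? a i).getD 0 > (PySem.List.pyGet? b i).getD 0
      then (s.1 + 1, s.2) else (s.1, s.2 + 1)) (0, 0)
  [p.1, p.2]

-- ===== PORT B =====
-- helper go(lo, hi) of Source B; the Nat argument is fuel making the recursion
-- structural (it never runs out when called with fuel = range length, proved below)
def solveGo (a : List Int) (b : List Int) : Nat → Int → Int → Int × Int
  | 0, _, _ => (0, 0)
  | fuel + 1, lo, hi =>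
    if hi - lo ≤ 0 then (0, 0)
    else if hi - lo = 1 then
      (if (PySem.List.pyGet? a lo).getD 0 > (PySem.List.pyGet? b lo).getD 0
       then (1, 0) else (0, 1))
    else
      let mid := PySem.Int.floordiv (lo + hi) 2
      let l := solveGo a b fuel lo mid
      let r := solveGo a b fuel mid hi
      (l.1 + r.1, l.2 + r.2)

def solve_alt (a : List Int) (b : List Int) : List Int :=
  let p := solveGo a b a.length 0 a.length
  [p.1, p.2]

-- ===== PRECONDITION & SPEC =====
-- Pre_: Python A indexes b at every i < len(a), raising IndexError when b is shorter.
def Pre_solve (a : List Int) (b : List Int) : Prop := a.length ≤ b.length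
instance (a : List Int) (b : List Int) : Decidable (Pre_solve a b) := by unfold Pre_solve; infer_instance
def pvWitness_solve : List Int × List Int := ([3, 1, 2], [2, 5, 2])

def Spec_solve (a : List Int) (b : List Int) (out : List Int) : Prop := out = solve_alt a b
instance (a : List Int) (b : List Int) (out : List Int) : Decidable (Spec_solve a b out) := by unfold Spec_solve; infer_instance

-- ===== CLAIM (what is proved, stated in full; the proofs are below) =====
def Claim_equal_solve : Prop := ∀ (a : List Int) (b : List Int), Dom_solve a b → Pre_solve a b → Spec_solve a b (solve a b)

-- ===== LEMMAS AND PROOFS =====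

-- the single-counter fold that both proofs are phrased in terms of
def winCount (a : List Int) (b : List Int) (lo hi : Int) : Int :=
  (PySem.List.pyRange lo hi 1).foldl
    (fun (t : Int) i =>
      if (PySem.List.pyGet? a i).getD 0 > (PySem.List.pyGet? b i).getD 0
      then t + 1 else t) 0

-- a single-counter fold shifts with its initial value
theorem fold_shift (f : Int → Prop) [DecidablePred f] (is : List Int) (s : Int) :
    is.foldl (fun (t : Int) i => if f i then t + 1 else t) s
      = s + is.foldl (fun (t : Int) i => if f i then t + 1 else t) 0 := by
  induction is generalizing s with
  | nil => simp
  | cons i is ih =>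
    simp only [List.foldl_cons]
    rw [ih, ih (if f i then (0:Int) + 1 else 0)]
    split_ifs <;> ring

-- winCount splits at any midpoint
theorem winCount_append (a b : List Int) (lo mid hi : Int) (h1 : lo ≤ mid) (h2 : mid ≤ hi) :
    winCount a b lo hi = winCount a b lo mid + winCount a b mid hi := by
  unfold winCount
  rw [PySem.List.pyRange_one_append lo mid hi h1 h2, List.foldl_append, fold_shift]

-- A's two-counter fold equals (count, length - count)
theorem foldA_eq (f : Int → Prop) [DecidablePred f] (is : List Int) (ap bp : Int) :
    is.foldl (fun (s : Int × Int) i => if f i then (s.1 + 1, s.2) else (s.1, s.2 + 1)) (ap, bp)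
      = (ap + is.foldl (fun (t : Int) i => if f i then t + 1 else t) 0,
         bp + (is.length : Int) - is.foldl (fun (t : Int) i => if f i then t + 1 else t) 0) := by
  induction is generalizing ap bp with
  | nil => simp
  | cons i is ih =>
    simp only [List.foldl_cons, List.length_cons]
    rw [fold_shift]
    split_ifs with h
    · rw [ih]; simp only [Prod.mk.injEq]; constructor <;> push_cast <;> ring
    · rw [ih]; simp only [Prod.mk.injEq]; constructor <;> push_cast <;> ring

-- B's divide-and-conquer returns (count, range length - count) given enough fuel
theorem solveGo_eq (a b : List Int) (fuel : Nat) : ∀ (lo hi : Int), lo ≤ hi → (hi - lo).toNat ≤ fuel →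
    solveGo a b fuel lo hi = (winCount a b lo hi, (hi - lo) - winCount a b lo hi) := by
  induction fuel with
  | zero =>
    intro lo hi h hf
    have he : hi = lo := by omega
    subst he
    unfold solveGo winCount
    rw [PySem.List.pyRange_one_eq_nil (by omega)]
    refine Prod.ext ?_ ?_ <;> simp
  | succ n ih =>
    intro lo hi h hf
    unfold solveGo
    by_cases h0 : hi - lo ≤ 0
    · rw [if_pos h0]
      unfold winCount
      rw [PySem.List.pyRange_one_eq_nil (by omega)]
      refine Prod.ext ?_ ?_ <;> simp <;> omega
    · rw [if_neg h0]
      by_cases h1 : hi - lo = 1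
      · rw [if_pos h1]
        have hlist : PySem.List.pyRange lo hi 1 = [lo] := by
          rw [PySem.List.pyRange_one_cons (by omega), PySem.List.pyRange_one_eq_nil (by omega)]
        unfold winCount
        rw [hlist]
        simp only [List.foldl_cons, List.foldl_nil]
        by_cases hc : (PySem.List.pyGet? a lo).getD 0 > (PySem.List.pyGet? b lo).getD 0
        · rw [if_pos hc, if_pos hc]
          refine Prod.ext ?_ ?_ <;> simp <;> omega
        · rw [if_neg hc, if_neg hc]
          refine Prod.ext ?_ ?_ <;> simp <;> omega
      · rw [if_neg h1]
        have hmid : PySem.Int.floordiv (lo + hi) 2 = (lo + hi) / 2 :=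
          PySem.Int.floordiv_eq_ediv_of_pos (by norm_num)
        have hm1 : lo ≤ PySem.Int.floordiv (lo + hi) 2 := by rw [hmid]; omega
        have hm2 : PySem.Int.floordiv (lo + hi) 2 ≤ hi := by rw [hmid]; omega
        have ih1 := ih lo (PySem.Int.floordiv (lo + hi) 2) hm1 (by rw [hmid]; omega)
        have ih2 := ih (PySem.Int.floordiv (lo + hi) 2) hi hm2 (by rw [hmid]; omega)
        show ((solveGo a b n lo (PySem.Int.floordiv (lo + hi) 2)).1
                + (solveGo a b n (PySem.Int.floordiv (lo + hi) 2) hi).1,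
              (solveGo a b n lo (PySem.Int.floordiv (lo + hi) 2)).2
                + (solveGo a b n (PySem.Int.floordiv (lo + hi) 2) hi).2)
            = (winCount a b lo hi, hi - lo - winCount a b lo hi)
        rw [ih1, ih2, winCount_append a b lo (PySem.Int.floordiv (lo + hi) 2) hi hm1 hm2]
        refine Prod.ext ?_ ?_ <;> simp <;> ring

-- ===== VERDICT (by name: the statement is the Claim_ definition above) =====
theorem solve_spec : Claim_equal_solve := by
  intro a b _ _
  unfold Spec_solve solve solve_alt
  simp only
  rw [foldA_eq (fun i => (PySem.List.pyGet? a i).getD 0 > (PySem.List.pyGet? b i).getD 0),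
      solveGo_eq a b a.length 0 a.length (by positivity) (by simp)]
  simp [winCount, PySem.List.length_pyRange_one]
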